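-- pv_equiv track=rewrite | github.com/JustineBijuPaul/Chess | chess.py | is_valid_rook_move
-- ===== SOURCE A (Python) =====
-- from typing import List, Tuple, Dict
--
-- def is_valid_rook_move(start: Tuple[int, int], end: Tuple[int, int], board: List[List[Dict]]) -> bool:
--     """Check if rook move is valid"""
--     start_row, start_col = start
--     end_row, end_col = end
--
--     if start_row != end_row and start_col != end_col:
--         return False
--
--     row_step = 0 if start_row == end_row else (end_row - start_row) // abs(end_row - start_row)
--     col_step = 0 if start_col == end_col else (end_col - start_col) // abs(end_col - start_col)
--
--     curr_row, curr_col = start_row + row_step, start_col + col_step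
--     while (curr_row, curr_col) != (end_row, end_col):
--         if board[curr_row][curr_col]:
--             return False
--         curr_row += row_step
--         curr_col += col_step
--
--     return True
-- ===== SOURCE B (Python) =====
-- def is_valid_rook_move(start, end, board):
--     """Check if rook move is valid"""
--     if start[0] != end[0] and start[1] != end[1]:
--         return False
--
--     def clear(a, b):
--         # all squares strictly between collinear a and b are empty:
--         # divide and conquer on the floor midpoint
--         if abs(b[0] - a[0]) + abs(b[1] - a[1]) <= 1:
--             return True
--         mid = ((a[0] + b[0]) // 2, (a[1] + b[1]) // 2)
--         return not board[mid[0]][mid[1]] and clear(a, mid) and clear(mid, b)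
--
--     return clear(start, end)
-- ===== Notes on version B (the rewrite author's own statement) =====
-- stated objective: alternative
-- what changed: Replaced A's signed-step linear walk over intermediate squares by a divide-and-conquer recursion that tests the floor midpoint of the segment and recurses on the two halves (each strictly-between square is visited exactly once, just in a different order).
-- outside the precondition, e.g. on is_valid_rook_move((0, 0), (0, -10), [[{}, {'p': 'w'}]]): A returns False, B raises IndexError
import Mathlib
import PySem

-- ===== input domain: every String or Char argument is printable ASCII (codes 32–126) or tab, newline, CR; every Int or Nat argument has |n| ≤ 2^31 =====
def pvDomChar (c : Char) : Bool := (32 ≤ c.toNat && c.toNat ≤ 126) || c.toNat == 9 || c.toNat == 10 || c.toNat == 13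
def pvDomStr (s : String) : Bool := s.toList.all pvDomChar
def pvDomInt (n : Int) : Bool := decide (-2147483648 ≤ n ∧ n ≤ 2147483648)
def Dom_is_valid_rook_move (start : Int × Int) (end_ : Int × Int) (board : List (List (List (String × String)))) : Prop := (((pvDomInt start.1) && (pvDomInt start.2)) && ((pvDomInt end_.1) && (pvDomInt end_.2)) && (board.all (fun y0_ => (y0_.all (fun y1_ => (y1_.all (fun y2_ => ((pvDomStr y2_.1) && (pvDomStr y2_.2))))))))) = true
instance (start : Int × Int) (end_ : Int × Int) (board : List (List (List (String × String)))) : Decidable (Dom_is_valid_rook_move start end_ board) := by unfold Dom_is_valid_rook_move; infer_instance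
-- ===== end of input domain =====

-- B replaces A's signed-step linear walk by a divide-and-conquer recursion on the floor
-- midpoint of the segment (objective: alternative; same asymptotic cost).

-- ===== PORT A =====
-- The while-loop of A, as structural recursion on a fuel that exactly bounds the number of
-- iterations (|Δrow| + |Δcol| + 1, computed at the call site); a board access that would raise
-- IndexError in Python (pyGet? = none) returns false here — those inputs are excluded by Pre_.
def rookLoop (board : List (List (List (String × String)))) (row_step col_step er ec : Int) :
    Int → Int → Nat → Bool
  | _, _, 0 => true
  | cr, cc, fuel + 1 =>
    if cr = er ∧ cc = ec then true
    else
      match PySem.List.pyGet? board cr with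
      | none => false  -- IndexError (outside Pre_)
      | some row =>
        match PySem.List.pyGet? row cc with
        | none => false  -- IndexError (outside Pre_)
        | some sq =>
          if sq.isEmpty then rookLoop board row_step col_step er ec (cr + row_step) (cc + col_step) fuel
          else false

def is_valid_rook_move (start : Int × Int) (end_ : Int × Int) (board : List (List (List (String × String)))) : Bool :=
  let sr := start.1; let sc := start.2
  let er := end_.1; let ec := end_.2
  if sr ≠ er ∧ sc ≠ ec then false
  else
    let row_step : Int := if sr = er then 0 else PySem.Int.floordiv (er - sr) ((er - sr).natAbs : Int)
    let col_step : Int := if sc = ec then 0 else PySem.Int.floordiv (ec - sc) ((ec - sc).natAbs : Int)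
    rookLoop board row_step col_step er ec (sr + row_step) (sc + col_step)
      ((er - sr).natAbs + (ec - sc).natAbs + 1)

-- ===== PORT B =====
-- not board[r][c] (dict truthiness); false on an index that would raise IndexError (outside Pre_).
def rookClear (board : List (List (List (String × String)))) (r c : Int) : Bool :=
  match PySem.List.pyGet? board r with
  | none => false  -- IndexError (outside Pre_)
  | some row =>
    match PySem.List.pyGet? row c with
    | none => false  -- IndexError (outside Pre_)
    | some sq => sq.isEmpty

-- Source B's recursive helper clear(a, b): base case at taxicab distance ≤ 1, else test the floor
-- midpoint and recurse on both halves; fuel (|Δrow| + |Δcol| + 1 at the call site) is only the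
-- termination device for the port — the Python recursion needs none.
def clearRec (board : List (List (List (String × String)))) :
    Nat → Int × Int → Int × Int → Bool
  | 0, _, _ => true
  | fuel + 1, a, b =>
    if (b.1 - a.1).natAbs + (b.2 - a.2).natAbs ≤ 1 then true
    else
      let mid : Int × Int := (PySem.Int.floordiv (a.1 + b.1) 2, PySem.Int.floordiv (a.2 + b.2) 2)
      rookClear board mid.1 mid.2 && clearRec board fuel a mid && clearRec board fuel mid b

def is_valid_rook_move_alt (start : Int × Int) (end_ : Int × Int) (board : List (List (List (String × String)))) : Bool :=
  if start.1 ≠ end_.1 ∧ start.2 ≠ end_.2 then false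
  else clearRec board ((end_.1 - start.1).natAbs + (end_.2 - start.2).natAbs + 1) start end_

-- ===== PRECONDITION & SPEC =====
-- square (r, c) can be indexed without IndexError
def sqOK (board : List (List (List (String × String)))) (r c : Int) : Bool :=
  match PySem.List.pyGet? board r with
  | none => false
  | some row => (PySem.List.pyGet? row c).isSome

-- Pre_ excludes inputs where some strictly-between square of a collinear move is out of board
-- range: there Python A raises IndexError — or, when a blocking piece sits before the
-- out-of-range square in A's travel order, returns False while Python B (which visits midpoints
-- first) raises IndexError; this slight narrowing beyond A's raise set is stated in the claim.
-- (Stated as cheap interval-containment arithmetic: the between squares form a contiguous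
-- integer interval, so 'every one indexable' is containment in [-len, len).)
def preRookB (start : Int × Int) (end_ : Int × Int) (board : List (List (List (String × String)))) : Bool :=
  (decide (start.1 ≠ end_.1) && decide (start.2 ≠ end_.2)) ||
  (decide (start.1 = end_.1) &&
    (decide (max start.2 end_.2 ≤ min start.2 end_.2 + 1) ||
     (match PySem.List.pyGet? board start.1 with
      | none => false
      | some row =>
        decide (-(row.length : Int) ≤ min start.2 end_.2 + 1) && decide (max start.2 end_.2 ≤ (row.length : Int))))) ||
  (decide (start.2 = end_.2) &&
    (decide (max start.1 end_.1 ≤ min start.1 end_.1 + 1) ||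
     (decide (-(board.length : Int) ≤ min start.1 end_.1 + 1) && decide (max start.1 end_.1 ≤ (board.length : Int)) &&
      (PySem.List.pyRange (min start.1 end_.1 + 1) (max start.1 end_.1) 1).all
        (fun r => sqOK board r start.2))))

def Pre_is_valid_rook_move (start : Int × Int) (end_ : Int × Int) (board : List (List (List (String × String)))) : Prop :=
  preRookB start end_ board = true

instance (start : Int × Int) (end_ : Int × Int) (board : List (List (List (String × String)))) : Decidable (Pre_is_valid_rook_move start end_ board) := by unfold Pre_is_valid_rook_move; infer_instance

def pvWitness_is_valid_rook_move : (Int × Int) × (Int × Int) × (List (List (List (String × String)))) :=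
  ((0, 0), (0, 2), [[[], [], []]])

def Spec_is_valid_rook_move (start : Int × Int) (end_ : Int × Int) (board : List (List (List (String × String)))) (out : Bool) : Prop := out = is_valid_rook_move_alt start end_ board
instance (start : Int × Int) (end_ : Int × Int) (board : List (List (List (String × String)))) (out : Bool) : Decidable (Spec_is_valid_rook_move start end_ board out) := by unfold Spec_is_valid_rook_move; infer_instance

-- ===== CLAIM (what is proved, stated in full; the proofs are below) =====
def Claim_equal_is_valid_rook_move : Prop := ∀ (start : Int × Int) (end_ : Int × Int) (board : List (List (List (String × String)))), Dom_is_valid_rook_move start end_ board → Pre_is_valid_rook_move start end_ board → Spec_is_valid_rook_move start end_ board (is_valid_rook_move start end_ board)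

-- ===== LEMMAS AND PROOFS =====

-- the canonical "all strictly-between squares of the segment are clear" forms both ports reduce to
def betweenClearRow (board : List (List (List (String × String)))) (r c0 c1 : Int) : Bool :=
  (PySem.List.pyRange (min c0 c1 + 1) (max c0 c1) 1).all (fun c => rookClear board r c)

def betweenClearCol (board : List (List (List (String × String)))) (c r0 r1 : Int) : Bool :=
  (PySem.List.pyRange (min r0 r1 + 1) (max r0 r1) 1).all (fun r => rookClear board r c)

-- Python's x // abs(x) is the sign of x
theorem floordiv_natAbs_sign (x : Int) (hx : x ≠ 0) :
    PySem.Int.floordiv x (x.natAbs : Int) = if 0 < x then 1 else -1 := by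
  rw [PySem.Int.floordiv_eq_ediv_of_pos (by omega)]
  rcases lt_or_gt_of_ne hx with h | h
  · have : (x.natAbs : Int) = -x := by omega
    rw [this, Int.ediv_neg, Int.ediv_self hx]
    simp [not_lt.mpr (le_of_lt h)]
  · have : (x.natAbs : Int) = x := by omega
    rw [this, Int.ediv_self hx]
    simp [h]

-- pointwise-equal predicates give equal `all`
theorem all_ext {a : Type} (l : List a) (p q : a → Bool) (h : ∀ x ∈ l, p x = q x) : l.all p = l.all q := by
  induction l with
  | nil => rfl
  | cons x xs ih =>
    simp only [List.all_cons]
    rw [h x (List.mem_cons_self), ih (fun y hy => h y (List.mem_cons_of_mem x hy))]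

-- A's loop, started n steps (in step direction (rs, cs), not both zero) away from the target,
-- computes the conjunction of rookClear over the n strictly-visited squares.
theorem rookLoop_eq_all (board : List (List (List (String × String)))) (rs cs : Int)
    (hne : rs ≠ 0 ∨ cs ≠ 0) :
    ∀ (n : Nat) (er ec cr cc : Int) (f : Nat), n < f → er = cr + rs * n → ec = cc + cs * n →
      rookLoop board rs cs er ec cr cc f
        = (List.range n).all (fun i => rookClear board (cr + rs * i) (cc + cs * i)) := by
  intro n
  induction n with
  | zero =>
    intro er ec cr cc f hf her hec
    match f, hf with
    | f + 1, _ =>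
      simp only [Nat.cast_zero, mul_zero, add_zero] at her hec
      simp [rookLoop, her, hec]
  | succ n ih =>
    intro er ec cr cc f hf her hec
    match f, hf with
    | f + 1, hf =>
      have hn1 : ((n + 1 : Nat) : Int) ≠ 0 := by push_cast; omega
      have hcond : ¬ (cr = er ∧ cc = ec) := by
        rintro ⟨h1, h2⟩
        have e1 : rs * ((n + 1 : Nat) : Int) = 0 := by rw [her] at h1; linarith
        have e2 : cs * ((n + 1 : Nat) : Int) = 0 := by rw [hec] at h2; linarith
        rcases mul_eq_zero.mp e1 with h | h
        · rcases mul_eq_zero.mp e2 with h' | h'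
          · rcases hne with hh | hh <;> contradiction
          · exact hn1 h'
        · exact hn1 h
      simp only [rookLoop, hcond, if_false]
      cases hrow : PySem.List.pyGet? board cr with
      | none => rw [List.range_succ_eq_map]; simp [rookClear, hrow]
      | some row =>
        dsimp only
        cases hc : PySem.List.pyGet? row cc with
        | none => rw [List.range_succ_eq_map]; simp [rookClear, hrow, hc]
        | some sq =>
          dsimp only
          cases hsq : sq.isEmpty with
          | false => rw [List.range_succ_eq_map]; simp [rookClear, hrow, hc, hsq]
          | true =>
            rw [if_pos rfl]
            rw [ih er ec (cr + rs) (cc + cs) f (by omega)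
                  (by rw [her]; push_cast; ring) (by rw [hec]; push_cast; ring)]
            rw [List.range_succ_eq_map]
            simp only [List.all_cons, List.all_map, Nat.cast_zero, mul_zero, add_zero]
            have hhead : rookClear board cr cc = true := by
              simp [rookClear, hrow, hc, hsq]
            rw [hhead, Bool.true_and]
            apply all_ext
            intro i _
            congr 1 <;> push_cast <;> ring

-- reversing the direction of an all over n consecutive integers
theorem all_range_flip (p : Int → Bool) (a : Int) (n : Nat) :
    (List.range n).all (fun i => p (a - (i : Int))) = (List.range n).all (fun i => p (a - (n : Int) + 1 + (i : Int))) := by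
  rw [Bool.eq_iff_iff]
  simp only [List.all_eq_true, List.mem_range]
  constructor
  · intro h i hi
    have := h (n - 1 - i) (by omega)
    have e : a - (↑(n - 1 - i) : Int) = a - n + 1 + i := by omega
    rwa [e] at this
  · intro h i hi
    have := h (n - 1 - i) (by omega)
    have e : a - (n : Int) + 1 + (↑(n - 1 - i) : Int) = a - i := by omega
    rwa [e] at this

-- splitting an `all` over consecutive integers at an interior point
theorem all_pyRange_split (p : Int → Bool) (lo m hi : Int) (h1 : lo ≤ m) (h2 : m < hi) :
    (PySem.List.pyRange lo hi 1).all p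
      = ((PySem.List.pyRange lo m 1).all p && p m && (PySem.List.pyRange (m + 1) hi 1).all p) := by
  rw [PySem.List.pyRange_one_append lo m hi h1 (le_of_lt h2),
      PySem.List.pyRange_one_cons h2]
  simp [Bool.and_assoc]

-- A's port equals the canonical between-squares form (with the non-collinear rejection in front)
theorem a_char (start : Int × Int) (end_ : Int × Int) (board : List (List (List (String × String)))) :
    is_valid_rook_move start end_ board
      = (if start.1 ≠ end_.1 ∧ start.2 ≠ end_.2 then false
         else if start.1 = end_.1 then betweenClearRow board start.1 start.2 end_.2
         else betweenClearCol board start.2 start.1 end_.1) := by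
  obtain ⟨sr, sc⟩ := start
  obtain ⟨er, ec⟩ := end_
  unfold is_valid_rook_move betweenClearRow betweenClearCol
  simp only
  by_cases hnc : sr ≠ er ∧ sc ≠ ec
  · simp [hnc]
  · rw [if_neg hnc, if_neg hnc]
    by_cases hr : sr = er
    · subst hr
      rw [if_pos rfl]
      by_cases hc : sc = ec
      · subst hc
        rw [PySem.List.pyRange_one_eq_nil (by omega : max sc sc ≤ min sc sc + 1)]
        simp [rookLoop]
      · rw [if_neg hc, floordiv_natAbs_sign _ (by omega), if_pos rfl]
        set d : Nat := (ec - sc).natAbs with hd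
        have hd1 : 1 ≤ d := by omega
        have hfuel : d - 1 < (sr - sr).natAbs + (ec - sc).natAbs + 1 := by omega
        have hlen : (max sc ec - (min sc ec + 1)).toNat = d - 1 := by omega
        by_cases hpos : 0 < ec - sc
        · rw [if_pos hpos]
          rw [rookLoop_eq_all board 0 1 (Or.inr one_ne_zero) (d - 1) sr ec (sr + 0) (sc + 1) _ hfuel (by ring) (by omega)]
          rw [PySem.List.pyRange_one, hlen, List.all_map]
          apply all_ext
          intro i _
          show rookClear board (sr + 0 + 0 * (i : Int)) (sc + 1 + 1 * (i : Int)) = rookClear board sr (min sc ec + 1 + (i : Int))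
          congr 1 <;> omega
        · rw [if_neg hpos]
          rw [rookLoop_eq_all board 0 (-1) (Or.inr (by norm_num)) (d - 1) sr ec (sr + 0) (sc + -1) _ hfuel (by ring) (by omega)]
          rw [PySem.List.pyRange_one, hlen, List.all_map]
          calc (List.range (d - 1)).all (fun i => rookClear board (sr + 0 + 0 * (i : Int)) (sc + -1 + -1 * (i : Int)))
              = (List.range (d - 1)).all (fun i => (fun x => rookClear board sr x) ((sc - 1) - (i : Int))) := by
                apply all_ext; intro i _
                show rookClear board (sr + 0 + 0 * (i : Int)) (sc + -1 + -1 * (i : Int)) = rookClear board sr (sc - 1 - (i : Int))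
                congr 1 <;> ring
            _ = (List.range (d - 1)).all (fun i => (fun x => rookClear board sr x) ((sc - 1) - ((d - 1 : Nat) : Int) + 1 + (i : Int))) :=
                all_range_flip (fun x => rookClear board sr x) (sc - 1) (d - 1)
            _ = (List.range (d - 1)).all (fun k => rookClear board sr (min sc ec + 1 + (k : Int))) := by
                apply all_ext; intro i _
                show rookClear board sr (sc - 1 - ((d - 1 : Nat) : Int) + 1 + (i : Int)) = rookClear board sr (min sc ec + 1 + (i : Int))
                congr 1; omega
    · have hcc : sc = ec := by tauto
      subst hcc
      rw [if_neg hr, if_neg hr, if_pos rfl, floordiv_natAbs_sign _ (by omega)]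
      set d : Nat := (er - sr).natAbs with hd
      have hd1 : 1 ≤ d := by omega
      have hfuel : d - 1 < (er - sr).natAbs + (sc - sc).natAbs + 1 := by omega
      have hlen : (max sr er - (min sr er + 1)).toNat = d - 1 := by omega
      by_cases hpos : 0 < er - sr
      · rw [if_pos hpos]
        rw [rookLoop_eq_all board 1 0 (Or.inl one_ne_zero) (d - 1) er sc (sr + 1) (sc + 0) _ hfuel (by omega) (by ring)]
        rw [PySem.List.pyRange_one, hlen, List.all_map]
        apply all_ext
        intro i _
        show rookClear board (sr + 1 + 1 * (i : Int)) (sc + 0 + 0 * (i : Int)) = rookClear board (min sr er + 1 + (i : Int)) sc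
        congr 1 <;> omega
      · rw [if_neg hpos]
        rw [rookLoop_eq_all board (-1) 0 (Or.inl (by norm_num)) (d - 1) er sc (sr + -1) (sc + 0) _ hfuel (by omega) (by ring)]
        rw [PySem.List.pyRange_one, hlen, List.all_map]
        calc (List.range (d - 1)).all (fun i => rookClear board (sr + -1 + -1 * (i : Int)) (sc + 0 + 0 * (i : Int)))
            = (List.range (d - 1)).all (fun i => (fun x => rookClear board x sc) ((sr - 1) - (i : Int))) := by
              apply all_ext; intro i _
              show rookClear board (sr + -1 + -1 * (i : Int)) (sc + 0 + 0 * (i : Int)) = rookClear board (sr - 1 - (i : Int)) sc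
              congr 1 <;> ring
          _ = (List.range (d - 1)).all (fun i => (fun x => rookClear board x sc) ((sr - 1) - ((d - 1 : Nat) : Int) + 1 + (i : Int))) :=
              all_range_flip (fun x => rookClear board x sc) (sr - 1) (d - 1)
          _ = (List.range (d - 1)).all (fun k => rookClear board (min sr er + 1 + (k : Int)) sc) := by
            apply all_ext; intro i _
            show rookClear board (sr - 1 - ((d - 1 : Nat) : Int) + 1 + (i : Int)) sc = rookClear board (min sr er + 1 + (i : Int)) sc
            congr 1; omega

-- B's midpoint recursion on a horizontal segment computes the canonical row form
theorem clearRec_row (board : List (List (List (String × String)))) :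
    ∀ (f : Nat) (r c0 c1 : Int), (c1 - c0).natAbs < f →
      clearRec board f (r, c0) (r, c1) = betweenClearRow board r c0 c1 := by
  intro f
  induction f with
  | zero => intro r c0 c1 h; omega
  | succ f ih =>
    intro r c0 c1 hf
    by_cases hbase : (c1 - c0).natAbs ≤ 1
    · unfold clearRec
      rw [if_pos (by simpa using hbase)]
      unfold betweenClearRow
      rw [PySem.List.pyRange_one_eq_nil (by omega)]
      rfl
    · unfold clearRec
      rw [if_neg (by simpa using hbase)]
      simp only
      have hmr : PySem.Int.floordiv (r + r) 2 = r := by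
        rw [PySem.Int.floordiv_eq_ediv_of_pos (by omega)]; omega
      have hmv : PySem.Int.floordiv (c0 + c1) 2 = (c0 + c1) / 2 := by
        rw [PySem.Int.floordiv_eq_ediv_of_pos (by omega)]
      set m : Int := (c0 + c1) / 2 with hm
      have hbet : min c0 c1 < m ∧ m < max c0 c1 := by
        constructor <;> omega
      rw [hmr, hmv]
      rw [ih r c0 m (by omega), ih r m c1 (by omega)]
      unfold betweenClearRow
      by_cases hlt : c0 < c1
      · have e1 : min c0 c1 = c0 := by omega
        have e2 : max c0 c1 = c1 := by omega
        have e3 : min c0 m = c0 := by omega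
        have e4 : max c0 m = m := by omega
        have e5 : min m c1 = m := by omega
        have e6 : max m c1 = c1 := by omega
        rw [e1, e2, e3, e4, e5, e6,
            all_pyRange_split (fun c => rookClear board r c) (c0 + 1) m c1 (by omega) (by omega)]
        cases rookClear board r m <;> simp
      · have hgt : c1 < c0 := by omega
        have e1 : min c0 c1 = c1 := by omega
        have e2 : max c0 c1 = c0 := by omega
        have e3 : min c0 m = m := by omega
        have e4 : max c0 m = c0 := by omega
        have e5 : min m c1 = c1 := by omega
        have e6 : max m c1 = m := by omega
        rw [e1, e2, e3, e4, e5, e6,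
            all_pyRange_split (fun c => rookClear board r c) (c1 + 1) m c0 (by omega) (by omega)]
        cases rookClear board r m <;> simp [Bool.and_comm]
      
-- B's midpoint recursion on a vertical segment computes the canonical column form
theorem clearRec_col (board : List (List (List (String × String)))) :
    ∀ (f : Nat) (c r0 r1 : Int), (r1 - r0).natAbs < f →
      clearRec board f (r0, c) (r1, c) = betweenClearCol board c r0 r1 := by
  intro f
  induction f with
  | zero => intro c r0 r1 h; omega
  | succ f ih =>
    intro c r0 r1 hf
    by_cases hbase : (r1 - r0).natAbs ≤ 1
    · unfold clearRec
      rw [if_pos (by simpa using hbase)]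
      unfold betweenClearCol
      rw [PySem.List.pyRange_one_eq_nil (by omega)]
      rfl
    · unfold clearRec
      rw [if_neg (by simpa using hbase)]
      simp only
      have hmc : PySem.Int.floordiv (c + c) 2 = c := by
        rw [PySem.Int.floordiv_eq_ediv_of_pos (by omega)]; omega
      have hmv : PySem.Int.floordiv (r0 + r1) 2 = (r0 + r1) / 2 := by
        rw [PySem.Int.floordiv_eq_ediv_of_pos (by omega)]
      set m : Int := (r0 + r1) / 2 with hm
      have hbet : min r0 r1 < m ∧ m < max r0 r1 := by
        constructor <;> omega
      rw [hmc, hmv]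
      rw [ih c r0 m (by omega), ih c m r1 (by omega)]
      unfold betweenClearCol
      by_cases hlt : r0 < r1
      · have e1 : min r0 r1 = r0 := by omega
        have e2 : max r0 r1 = r1 := by omega
        have e3 : min r0 m = r0 := by omega
        have e4 : max r0 m = m := by omega
        have e5 : min m r1 = m := by omega
        have e6 : max m r1 = r1 := by omega
        rw [e1, e2, e3, e4, e5, e6,
            all_pyRange_split (fun r => rookClear board r c) (r0 + 1) m r1 (by omega) (by omega)]
        cases rookClear board m c <;> simp
      · have hgt : r1 < r0 := by omega
        have e1 : min r0 r1 = r1 := by omega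
        have e2 : max r0 r1 = r0 := by omega
        have e3 : min r0 m = m := by omega
        have e4 : max r0 m = r0 := by omega
        have e5 : min m r1 = r1 := by omega
        have e6 : max m r1 = m := by omega
        rw [e1, e2, e3, e4, e5, e6,
            all_pyRange_split (fun r => rookClear board r c) (r1 + 1) m r0 (by omega) (by omega)]
        cases rookClear board m c <;> simp [Bool.and_comm]

-- B's port equals the same canonical form
theorem b_char (start : Int × Int) (end_ : Int × Int) (board : List (List (List (String × String)))) :
    is_valid_rook_move_alt start end_ board
      = (if start.1 ≠ end_.1 ∧ start.2 ≠ end_.2 then false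
         else if start.1 = end_.1 then betweenClearRow board start.1 start.2 end_.2
         else betweenClearCol board start.2 start.1 end_.1) := by
  obtain ⟨sr, sc⟩ := start
  obtain ⟨er, ec⟩ := end_
  unfold is_valid_rook_move_alt
  simp only
  by_cases hnc : sr ≠ er ∧ sc ≠ ec
  · simp [hnc]
  · rw [if_neg hnc, if_neg hnc]
    by_cases hr : sr = er
    · subst hr
      rw [if_pos rfl]
      exact clearRec_row board _ sr sc ec (by omega)
    · have hcc : sc = ec := by tauto
      subst hcc
      rw [if_neg hr]
      exact clearRec_col board _ sc sr er (by omega)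

-- ===== VERDICT (by name: the statement is the Claim_ definition above) =====
theorem is_valid_rook_move_spec : Claim_equal_is_valid_rook_move := by
  intro start end_ board _ _
  unfold Spec_is_valid_rook_move
  rw [a_char, b_char]
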